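-- pv_equiv track=rewrite | github.com/averrie/cast-agent | src/cast_agent/history.py | _compact_context_batch
-- ===== SOURCE A (Python) =====
-- def _compact_context_batch(content: str) -> str:
--     lines = content.split("\n")
--     header = lines[0] if lines else ""
--     footer = ""
--     footer_idx = len(lines)
--     for idx in range(len(lines) - 1, -1, -1):
--         if lines[idx].startswith("---") and "remaining" in lines[idx]:
--             footer_idx = idx
--             footer = "\n".join(lines[idx:])
--             break
--
--     blocks: list[tuple[str, list[str]]] = []
--     current_type: str | None = None
--     current_lines: list[str] = []
--
--     for line in lines[1:footer_idx]:
--         if line.startswith("[") and line.endswith("]"):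
--             if current_type is not None:
--                 blocks.append((current_type, current_lines))
--             current_type = line
--             current_lines = []
--         elif current_type is not None:
--             if line.strip():
--                 current_lines.append(line)
--
--     if current_type is not None:
--         blocks.append((current_type, current_lines))
--
--     tag = header.replace(" ---", " [COMPACTED] ---", 1)
--     parts = [tag]
--     for type_header, body_lines in blocks:
--         if not body_lines:
--             parts.append(type_header)
--         elif len(body_lines) <= 3:
--             parts.append(type_header + "\n" + "\n".join(body_lines))
--         else:
--             preview = body_lines[0]
--             parts.append(f"{type_header} {preview} (+ {len(body_lines) - 1} lines)")
--     parts.append(footer)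
--     return "\n".join(parts)
-- ===== SOURCE B (Python) =====
-- def _is_header(line: str) -> bool:
--     return line.startswith("[") and line.endswith("]")
--
--
-- def _is_footer(line: str) -> bool:
--     return line.startswith("---") and "remaining" in line
--
--
-- def _render(block):
--     head, body = block
--     if not body:
--         return head
--     if len(body) <= 3:
--         return head + "\n" + "\n".join(body)
--     return f"{head} {body[0]} (+ {len(body) - 1} lines)"
--
--
-- def _compact_context_batch(content: str) -> str:
--     lines = content.split("\n")
--     header = lines[0] if lines else ""
--
--     # forward scan keeping the LAST footer match (= A's backward-first match)
--     footer_idx = len(lines)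
--     for idx, line in enumerate(lines):
--         if _is_footer(line):
--             footer_idx = idx
--     footer = "\n".join(lines[footer_idx:])
--
--     body = lines[1:footer_idx]
--     # drop lines before the first block header
--     while body and not _is_header(body[0]):
--         body = body[1:]
--
--     blocks = []
--     rest = body
--     while rest:
--         head, tail = rest[0], rest[1:]
--         j = 0
--         while j < len(tail) and not _is_header(tail[j]):
--             j += 1
--         blocks.append((head, [l for l in tail[:j] if l.strip()]))
--         rest = tail[j:]
--
--     tag = header.replace(" ---", " [COMPACTED] ---", 1)
--     return "\n".join([tag] + [_render(b) for b in blocks] + [footer])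
-- ===== Notes on version B (the rewrite author's own statement) =====
-- stated objective: alternative
-- what changed: Replaces A's backward break-scan for the footer with a forward keep-last scan, and A's single-pass current_type/current_lines state machine with a recursive takeWhile/dropWhile grouping of the body into (header, lines) blocks rendered by a map; same rendering rules.
import Mathlib
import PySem

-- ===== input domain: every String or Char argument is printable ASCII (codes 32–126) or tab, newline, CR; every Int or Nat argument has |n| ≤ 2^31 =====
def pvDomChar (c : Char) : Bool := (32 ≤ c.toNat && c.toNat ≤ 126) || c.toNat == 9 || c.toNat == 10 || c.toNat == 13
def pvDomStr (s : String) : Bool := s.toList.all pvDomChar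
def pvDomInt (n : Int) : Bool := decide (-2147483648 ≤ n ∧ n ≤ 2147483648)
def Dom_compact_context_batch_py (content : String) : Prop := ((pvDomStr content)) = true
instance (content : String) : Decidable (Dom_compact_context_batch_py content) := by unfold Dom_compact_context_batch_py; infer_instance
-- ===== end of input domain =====

-- B replaces A's one-pass block state machine by a backward-free forward footer scan (keep the last match)
-- and a recursive takeWhile/dropWhile grouping of the body into (header, lines) blocks; same rendering. Objective: alternative decomposition (same cost).

-- shared predicates / rendering (identical lines of Python in both programs)
def pvIsHeader (l : String) : Bool := PySem.Str.startswith l "[" && PySem.Str.endswith l "]"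
def pvIsFooter (l : String) : Bool := PySem.Str.startswith l "---" && PySem.Str.isIn "remaining" l
def pvKeep (l : String) : Bool := !(PySem.Chars.strip l.toList == [])  -- `if line.strip():`

-- str.replace(old, new, 1): replace the leftmost occurrence; exact for the nonempty `old` used here
def pvReplace1 : List Char → List Char → List Char → List Char
  | [], _, _ => []
  | c :: cs, old, new =>
    if old.isPrefixOf (c :: cs) then new ++ (c :: cs).drop old.length
    else c :: pvReplace1 cs old new

def pvRender (b : String × List String) : String :=
  if b.2.isEmpty then b.1
  else if b.2.length ≤ 3 then b.1 ++ "\n" ++ PySem.Str.join "\n" b.2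
  else b.1 ++ " " ++ b.2.headD "" ++ " (+ " ++ PySem.Int.toStr ((b.2.length : Int) - 1) ++ " lines)"

-- ===== PORT A =====
-- A's backward `for idx in range(len-1,-1,-1): … break` (index always in range, so the getD default is never used)
def pvFooterScan (lines : List String) : List Int → Int × String
  | [] => ((lines.length : Int), "")
  | i :: rest =>
    if pvIsFooter (PySem.List.pyGetD lines i "") then
      (i, PySem.Str.join "\n" (PySem.List.slice lines (some i) none))
    else pvFooterScan lines rest

-- A's loop body over lines[1:footer_idx]; state = (current_type, current_lines, blocks)
def pvStepA (s : Option String × List String × List (String × List String)) (line : String) :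
    Option String × List String × List (String × List String) :=
  if pvIsHeader line then
    match s.1 with
    | some t => (some line, ([], s.2.2 ++ [(t, s.2.1)]))
    | none => (some line, ([], s.2.2))
  else
    match s.1 with
    | some _ => if pvKeep line then (s.1, (s.2.1 ++ [line], s.2.2)) else s
    | none => s

-- trailing `if current_type is not None: blocks.append(...)`
def pvFinalize (s : Option String × List String × List (String × List String)) :
    List (String × List String) :=
  s.2.2 ++ (match s.1 with | some t => [(t, s.2.1)] | none => [])

def compact_context_batch_py (content : String) : String :=
  let lines := (PySem.Str.split? content "\n").getD []
  let header := match lines with | [] => "" | h :: _ => h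
  let fs := pvFooterScan lines (PySem.List.pyRange ((lines.length : Int) - 1) (-1) (-1))
  let st := (PySem.List.slice lines (some 1) (some fs.1)).foldl pvStepA (none, ([], []))
  let blocks := pvFinalize st
  let tag := String.ofList (pvReplace1 header.toList " ---".toList " [COMPACTED] ---".toList)
  let parts := blocks.foldl (fun acc b => acc ++ [pvRender b]) [tag]
  PySem.Str.join "\n" (parts ++ [fs.2])

-- ===== PORT B =====
-- B's grouping: take the header, takeWhile the body up to the next header, recurse on the rest
def pvGroup : List String → List (String × List String)
  | [] => []
  | h :: tail =>
    (h, (tail.takeWhile (fun l => !pvIsHeader l)).filter pvKeep) ::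
      pvGroup (tail.dropWhile (fun l => !pvIsHeader l))
termination_by ls => ls.length
decreasing_by
  exact Nat.lt_succ_of_le (List.length_dropWhile_le _ _)

def compact_context_batch_py_alt (content : String) : String :=
  let lines := (PySem.Str.split? content "\n").getD []
  let header := match lines with | [] => "" | h :: _ => h
  -- forward scan keeping the LAST footer match
  let footer_idx := (PySem.List.enumerate lines 0).foldl
    (fun fi p => if pvIsFooter p.2 then p.1 else fi) ((lines.length : Int))
  let footer := PySem.Str.join "\n" (PySem.List.slice lines (some footer_idx) none)
  let body := PySem.List.slice lines (some 1) (some footer_idx)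
  let blocks := pvGroup (body.dropWhile (fun l => !pvIsHeader l))
  let tag := String.ofList (pvReplace1 header.toList " ---".toList " [COMPACTED] ---".toList)
  PySem.Str.join "\n" ([tag] ++ blocks.map pvRender ++ [footer])

-- ===== PRECONDITION & SPEC =====
def Spec_compact_context_batch_py (content : String) (out : String) : Prop := out = compact_context_batch_py_alt content
instance (content : String) (out : String) : Decidable (Spec_compact_context_batch_py content out) := by unfold Spec_compact_context_batch_py; infer_instance

-- ===== CLAIM (what is proved, stated in full; the proofs are below) =====
def Claim_equal_compact_context_batch_py : Prop := ∀ (content : String), Dom_compact_context_batch_py content → Spec_compact_context_batch_py content (compact_context_batch_py content)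

-- ===== LEMMAS AND PROOFS =====

-- range(len-1, -1, -1) is the reversed index list
lemma pvRevRange_eq (n : Nat) :
    PySem.List.pyRange ((n : Int) - 1) (-1) (-1)
      = ((List.range n).reverse).map (fun (k : Nat) => (k : Int)) := by
  rw [List.range_eq_range', List.reverse_range', List.map_map]
  unfold PySem.List.pyRange
  simp only [if_neg (by norm_num : ¬((-1:Int) = 0)), if_neg (by norm_num : ¬((0:Int) < -1))]
  rcases Nat.eq_zero_or_pos n with h | h
  · subst h; simp
  · rw [if_pos (by omega : (-1:Int) < (n:Int) - 1)]
    have hc : (((n : Int) - 1 - -1 + - -1 - 1) / - -1).toNat = n := by norm_num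
    rw [hc]
    apply List.map_congr_left
    intro k hk
    have : k < n := List.mem_range.mp hk
    simp only [Function.comp_apply]
    omega

lemma pvFind?_congr {α : Type} (p q : α → Bool) :
    ∀ (l : List α), (∀ a ∈ l, p a = q a) → l.find? p = l.find? q := by
  intro l h
  induction l with
  | nil => rfl
  | cons a l ih =>
    simp only [List.find?_cons, h a (List.mem_cons_self), ih (fun b hb => h b (List.mem_cons_of_mem _ hb))]

-- A's break-scan is find? on the index list
lemma pvScan_eq (lines : List String) (idxs : List Int) :
    pvFooterScan lines idxs
      = match idxs.find? (fun i => pvIsFooter (PySem.List.pyGetD lines i "")) with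
        | some i => (i, PySem.Str.join "\n" (PySem.List.slice lines (some i) none))
        | none => ((lines.length : Int), "") := by
  induction idxs with
  | nil => rfl
  | cons i rest ih =>
    by_cases h : pvIsFooter (PySem.List.pyGetD lines i "")
    · simp [pvFooterScan, h]
    · simp [pvFooterScan, h, ih]

-- B's keep-last forward fold is find? on the reversed index list
lemma pvFold_eq (lines : List String) (d : Int) :
    (PySem.List.enumerate lines 0).foldl (fun fi p => if pvIsFooter p.2 then p.1 else fi) d
      = match (((List.range lines.length).reverse).map (fun (k : Nat) => (k : Int))).find?
              (fun i => pvIsFooter (PySem.List.pyGetD lines i "")) with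
        | some i => i
        | none => d := by
  induction lines using List.reverseRecOn with
  | nil => rfl
  | append_singleton xs x ih =>
    rw [PySem.List.enumerate_append, List.foldl_append]
    simp only [PySem.List.enumerate_cons, PySem.List.enumerate_nil, List.foldl_cons, List.foldl_nil,
      List.length_append, List.length_cons, List.length_nil, List.range_succ, List.reverse_append,
      List.reverse_cons, List.reverse_nil, List.nil_append, List.singleton_append, List.map_cons]
    have hx : PySem.List.pyGetD (xs ++ [x]) ((xs.length : Int)) "" = x := by
      rw [PySem.List.pyGetD_natCast]
      simp [List.getD_eq_getElem?_getD]
    by_cases hfx : pvIsFooter x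
    · rw [List.find?_cons_of_pos (by simpa [hx])]
      simp [hfx]
    · rw [List.find?_cons_of_neg (by simp [hx, hfx])]
      rw [pvFind?_congr (fun i => pvIsFooter (PySem.List.pyGetD (xs ++ [x]) i ""))
            (fun i => pvIsFooter (PySem.List.pyGetD xs i "")) _ ?_]
      · simp only [if_neg (by simp [hfx] : ¬ pvIsFooter x = true)]
        exact ih
      · intro a ha
        rw [List.mem_map] at ha
        obtain ⟨k, hk, rfl⟩ := ha
        have hklt : k < xs.length := List.mem_range.mp (List.mem_reverse.mp hk)
        simp [PySem.List.pyGetD_natCast, List.getD_eq_getElem?_getD,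
          List.getElem?_append_left hklt]

lemma pvFooter_eq (lines : List String) :
    pvFooterScan lines (PySem.List.pyRange ((lines.length : Int) - 1) (-1) (-1))
      = ((PySem.List.enumerate lines 0).foldl (fun fi p => if pvIsFooter p.2 then p.1 else fi) ((lines.length : Int)),
         PySem.Str.join "\n" (PySem.List.slice lines
           (some ((PySem.List.enumerate lines 0).foldl (fun fi p => if pvIsFooter p.2 then p.1 else fi) ((lines.length : Int)))) none)) := by
  rw [pvRevRange_eq, pvScan_eq, pvFold_eq]
  cases hf : (((List.range lines.length).reverse).map (fun (k : Nat) => (k : Int))).find?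
      (fun i => pvIsFooter (PySem.List.pyGetD lines i "")) with
  | some i => rfl
  | none =>
    have hsl : PySem.List.slice lines (some ((lines.length : Nat) : Int)) none = [] := by
      rw [PySem.List.slice_from lines (by omega : (0:Int) ≤ ((lines.length : Nat) : Int))]
      simp
    simp only [hsl]
    rfl

lemma pvL2 (ls : List String) : ∀ (t : String) (cl : List String) (bs : List (String × List String)),
    pvFinalize (ls.foldl pvStepA (some t, (cl, bs)))
      = bs ++ (t, cl ++ (ls.takeWhile (fun l => !pvIsHeader l)).filter pvKeep)
          :: pvGroup (ls.dropWhile (fun l => !pvIsHeader l)) := by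
  induction ls with
  | nil => simp [pvFinalize, pvGroup]
  | cons l ls ih =>
    intro t cl bs
    by_cases h : pvIsHeader l
    · simp only [List.foldl_cons, pvStepA, h, if_true]
      rw [ih]
      simp [pvGroup, h]
    · by_cases hk : pvKeep l
      · simp only [List.foldl_cons, pvStepA, h]
        rw [if_neg Bool.false_ne_true, if_pos hk]
        rw [ih]
        simp [h, hk]
      · simp only [List.foldl_cons, pvStepA, h]
        rw [if_neg Bool.false_ne_true, if_neg hk]
        rw [ih]
        simp [h, hk]

lemma pvL1 (ls : List String) : ∀ (cl : List String) (bs : List (String × List String)),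
    pvFinalize (ls.foldl pvStepA (none, (cl, bs)))
      = bs ++ pvGroup (ls.dropWhile (fun l => !pvIsHeader l)) := by
  induction ls with
  | nil => simp [pvFinalize, pvGroup]
  | cons l ls ih =>
    intro cl bs
    by_cases h : pvIsHeader l
    · simp only [List.foldl_cons, pvStepA, h, if_true]
      rw [pvL2]
      simp [pvGroup, h]
    · simp only [List.foldl_cons, pvStepA, h]
      rw [if_neg Bool.false_ne_true]
      rw [ih]
      simp [h]

-- ===== VERDICT (by name: the statement is the Claim_ definition above) =====
theorem compact_context_batch_py_spec : Claim_equal_compact_context_batch_py := by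
  intro content _
  unfold Spec_compact_context_batch_py compact_context_batch_py compact_context_batch_py_alt
  simp only [pvFooter_eq, pvL1, List.nil_append, PySem.List.foldl_append_singleton_eq_map,
    List.singleton_append]
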